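-- pv_equiv track=rewrite | github.com/kaminow/ConsDB_analysis | annot_overlaps/scripts/rebase_vcf.py | rebase_vcf
-- ===== SOURCE A (Python) =====
-- def rebase_vcf(pers, vcf={}):
--     # First remove any variants that are the same in both the pers and this vcf
--     del_locs = set()
--     for loc, line in vcf.items():
--         # If the pers vcf (new ref) doesn't have a variant at this location,
--         #  leave it as is
--         if loc not in pers:
--             continue
--
--         ref, alt = line[3:5]
--
--         pers_line = pers[loc]
--         pers_ref, pers_alt = pers_line[3:5]
--
--         # Remove variants that are also present in the pers
--         if ref == pers_ref and alt == pers_alt: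
--             del_locs.add(loc)
--
--     for loc in del_locs:
--         del vcf[loc]
--
--     # Add any variants that are different from the pers (even if the vcf has the
--     #  ref allele)
--     for loc, pers_line in pers.items():
--         # If the loc is in the vcf, we've already dealt with it
--         if loc in vcf or loc in del_locs:
--             continue
--
--         pers_ref, pers_alt = pers_line[3:5]
--         new_line = pers_line.copy()
--         new_line[3] = pers_alt
--         new_line[4] = pers_ref
--         vcf[loc] = new_line
--
--     return(vcf)
-- ===== SOURCE B (Python) =====
-- # Single pass over pers replacing A's two-pass + del_locs-set structure; mutates vcf like A.
-- def rebase_vcf(pers, vcf={}):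
--     for loc, pers_line in pers.items():
--         if loc in vcf:
--             ref, alt = vcf[loc][3:5]
--             pers_ref, pers_alt = pers_line[3:5]
--             if ref == pers_ref and alt == pers_alt:
--                 del vcf[loc]
--         else:
--             pers_ref, pers_alt = pers_line[3:5]
--             new_line = pers_line.copy()
--             new_line[3] = pers_alt
--             new_line[4] = pers_ref
--             vcf[loc] = new_line
--     return vcf
-- ===== Notes on version B (the rewrite author's own statement) =====
-- stated objective: simpler
-- what changed: B merges A's three phases (scan vcf building a del_locs set, delete pass, scan pers against vcf-or-del_locs) into one loop over pers.items() that deletes a matching vcf entry or inserts the swapped line directly, dropping the del_locs set entirely.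
import Mathlib
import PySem

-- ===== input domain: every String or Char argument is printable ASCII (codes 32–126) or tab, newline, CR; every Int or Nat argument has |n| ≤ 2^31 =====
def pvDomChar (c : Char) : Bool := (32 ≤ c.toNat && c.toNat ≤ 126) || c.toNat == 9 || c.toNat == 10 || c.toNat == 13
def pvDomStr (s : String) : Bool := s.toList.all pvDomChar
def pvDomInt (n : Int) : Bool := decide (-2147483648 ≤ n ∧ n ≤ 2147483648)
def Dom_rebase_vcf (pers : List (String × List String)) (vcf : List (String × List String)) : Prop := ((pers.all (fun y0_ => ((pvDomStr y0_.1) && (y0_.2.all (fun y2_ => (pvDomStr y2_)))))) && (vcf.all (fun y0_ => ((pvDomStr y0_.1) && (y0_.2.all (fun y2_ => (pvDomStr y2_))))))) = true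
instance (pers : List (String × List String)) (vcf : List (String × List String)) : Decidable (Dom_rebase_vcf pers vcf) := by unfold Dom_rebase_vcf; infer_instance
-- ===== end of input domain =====

-- B replaces A's two scans + del_locs set by one pass over pers (simpler decomposition); both Pythons
-- mutate the vcf dict in place identically — the theorems below are about the returned dict.
-- Python A iterates the set del_locs only to delete those keys; the resulting dict does not depend on
-- that (hash) iteration order, so the port folds the deletions in insertion order.

-- ===== PORT A =====
def rebase_vcf (pers : List (String × List String)) (vcf : List (String × List String)) : List (String × List String) :=
  let persd : PySem.Dict String (List String) := PySem.Dict.mk pers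
  let vcfd : PySem.Dict String (List String) := PySem.Dict.mk vcf
  -- del_locs = set(); for loc, line in vcf.items(): …
  let del_locs : PySem.Set String :=
    vcfd.items.foldl (fun s q =>
      if persd.contains q.1 then
        -- ref, alt = line[3:5]; pers_ref, pers_alt = pers[loc][3:5]  (unpack raises outside Pre_)
        match PySem.List.slice q.2 (some 3) (some 5),
              PySem.List.slice (persd.getD q.1 []) (some 3) (some 5) with
        | [ref, alt], [pers_ref, pers_alt] =>
            if ref = pers_ref ∧ alt = pers_alt then PySem.Set.add s q.1 else s
        | _, _ => s
      else s) PySem.Set.empty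
  -- for loc in del_locs: del vcf[loc]
  let vcf2 : PySem.Dict String (List String) := del_locs.foldl (fun d loc => d.erase loc) vcfd
  -- for loc, pers_line in pers.items(): …
  let final : PySem.Dict String (List String) :=
    persd.items.foldl (fun d p =>
      if d.contains p.1 || PySem.Set.contains del_locs p.1 then d
      else
        match PySem.List.slice p.2 (some 3) (some 5) with
        | [pers_ref, pers_alt] => d.insert p.1 ((p.2.set 3 pers_alt).set 4 pers_ref)
        | _ => d) vcf2
  final.items

-- ===== PORT B =====
def rebase_vcf_alt (pers : List (String × List String)) (vcf : List (String × List String)) : List (String × List String) :=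
  (pers.foldl (fun d p =>
      if d.contains p.1 then
        -- ref, alt = vcf[loc][3:5]; pers_ref, pers_alt = pers_line[3:5] — the tuple unpack is
        -- rendered by a length-2 guard: exact where both slices have 2 elements; elsewhere the
        -- Python raises ValueError (excluded by Pre_)
        if (PySem.List.slice (d.getD p.1 []) (some 3) (some 5)).length = 2 ∧
            (PySem.List.slice p.2 (some 3) (some 5)).length = 2 then
          if (PySem.List.slice (d.getD p.1 []) (some 3) (some 5)).getD 0 "" =
                (PySem.List.slice p.2 (some 3) (some 5)).getD 0 "" ∧
              (PySem.List.slice (d.getD p.1 []) (some 3) (some 5)).getD 1 "" =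
                (PySem.List.slice p.2 (some 3) (some 5)).getD 1 "" then d.erase p.1
          else d
        else d
      else
        -- pers_ref, pers_alt = pers_line[3:5]; new_line[3] = pers_alt; new_line[4] = pers_ref
        if (PySem.List.slice p.2 (some 3) (some 5)).length = 2 then
          d.insert p.1 ((p.2.set 3 ((PySem.List.slice p.2 (some 3) (some 5)).getD 1 "")).set 4
            ((PySem.List.slice p.2 (some 3) (some 5)).getD 0 ""))
        else d) (PySem.Dict.mk vcf)).items

-- ===== PRECONDITION & SPEC =====
-- The Nodup clauses do not narrow A's domain: Python dicts cannot carry duplicate keys.  The length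
-- clauses exclude exactly the inputs on which A raises ValueError unpacking line[3:5] (every pers line
-- is unpacked; a vcf line is unpacked iff its loc is also a key of pers).
def Pre_rebase_vcf (pers : List (String × List String)) (vcf : List (String × List String)) : Prop :=
  (pers.map Prod.fst).Nodup ∧ (vcf.map Prod.fst).Nodup ∧
  (∀ p ∈ pers, 5 ≤ p.2.length) ∧
  (∀ q ∈ vcf, q.1 ∈ pers.map Prod.fst → 5 ≤ q.2.length)
instance (pers : List (String × List String)) (vcf : List (String × List String)) : Decidable (Pre_rebase_vcf pers vcf) := by unfold Pre_rebase_vcf; infer_instance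

def pvWitness_rebase_vcf : (List (String × List String)) × (List (String × List String)) :=
  ([("1", ["1", "5", ".", "A", "G"]), ("3", ["3", "9", ".", "C", "T"])],
   [("1", ["1", "5", ".", "A", "G"]), ("2", ["2", "7", ".", "T", "C"])])

def Spec_rebase_vcf (pers : List (String × List String)) (vcf : List (String × List String)) (out : List (String × List String)) : Prop := out = rebase_vcf_alt pers vcf
instance (pers : List (String × List String)) (vcf : List (String × List String)) (out : List (String × List String)) : Decidable (Spec_rebase_vcf pers vcf out) := by unfold Spec_rebase_vcf; infer_instance

-- ===== CLAIM (what is proved, stated in full; the proofs are below) =====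
def Claim_equal_rebase_vcf : Prop := ∀ (pers : List (String × List String)) (vcf : List (String × List String)), Dom_rebase_vcf pers vcf → Pre_rebase_vcf pers vcf → Spec_rebase_vcf pers vcf (rebase_vcf pers vcf)

-- ===== LEMMAS AND PROOFS =====

-- line[3:5]
def pvSl (l : List String) : List String := PySem.List.slice l (some 3) (some 5)

-- a vcf entry q is deleted iff pers has a line at q.1 with the same (ref, alt)
def pvDel (pers : List (String × List String)) (q : String × List String) : Bool :=
  match (PySem.Dict.mk pers).get? q.1 with
  | some line => decide (pvSl q.2 = pvSl line)
  | none => false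

-- the entry added for a pers line whose loc is not in the original vcf
def pvAddEntry (p : String × List String) : String × List String :=
  (p.1, (p.2.set 3 ((pvSl p.2).getD 1 "")).set 4 ((pvSl p.2).getD 0 ""))

lemma pvSl_pair {l : List String} (h : 5 ≤ l.length) : ∃ a b, pvSl l = [a, b] := by
  have hlen : (pvSl l).length = 2 := by
    simp [pvSl, PySem.List.slice, PySem.List.clampIdx]
    omega
  match hsl : pvSl l with
  | [a, b] => exact ⟨a, b, rfl⟩
  | [] | [_] | _ :: _ :: _ :: _ => simp [hsl] at hlen

lemma pvDel_nil (q : String × List String) : pvDel [] q = false := by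
  simp [pvDel, PySem.Dict.get?]

lemma pvDel_cons (p : String × List String) (pers : List (String × List String)) (q : String × List String) :
    pvDel (p :: pers) q = if q.1 = p.1 then decide (pvSl q.2 = pvSl p.2) else pvDel pers q := by
  rcases p with ⟨k, v⟩
  simp only [pvDel, PySem.Dict.get?_mk_cons, beq_iff_eq]
  by_cases h : q.1 = k
  · simp [h]
  · simp [h, Ne.symm h]

lemma contains_erase_of_ne {d : PySem.Dict String (List String)} {k y : String} (h : k ≠ y) :
    (d.erase y).contains k = d.contains k := by
  simp only [PySem.Dict.contains, PySem.Dict.erase, List.any_filter]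
  apply List.any_congr rfl
  intro q
  by_cases hq : q.1 = k
  · simp [hq, h]
  · simp [hq]

lemma contains_iff_mem_map_fst (d : PySem.Dict String (List String)) (k : String) :
    d.contains k = true ↔ k ∈ d.items.map Prod.fst := by
  simp [PySem.Dict.contains, List.any_eq_true]

lemma pvDel_of_not_mem {pers : List (String × List String)} {q : String × List String}
    (h : q.1 ∉ pers.map Prod.fst) : pvDel pers q = false := by
  have hc : (PySem.Dict.mk pers).contains q.1 = false := by
    cases hcc : (PySem.Dict.mk pers).contains q.1
    · rfl
    · exact absurd ((contains_iff_mem_map_fst _ _).mp hcc) h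
  have hg : (PySem.Dict.mk pers).get? q.1 = none := by
    rw [PySem.Dict.contains_eq_isSome_get?] at hc
    exact Option.not_isSome_iff_eq_none.mp (by simp [hc])
  simp [pvDel, hg]

lemma nodup_erase_keys {d : PySem.Dict String (List String)} {k : String}
    (hnd : (d.items.map Prod.fst).Nodup) :
    ((d.erase k).items.map Prod.fst).Nodup := by
  have he : (d.erase k).items = d.items.filter (fun q => !(q.1 == k)) := rfl
  rw [he]
  exact (List.Sublist.map _ List.filter_sublist).nodup hnd

-- B's single loop, characterised
lemma loopB (pers : List (String × List String)) (d : PySem.Dict String (List String))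
    (hnd : (d.items.map Prod.fst).Nodup)
    (hpn : (pers.map Prod.fst).Nodup)
    (hlen : ∀ p ∈ pers, 5 ≤ p.2.length) :
    (pers.foldl (fun d p =>
      if d.contains p.1 then
        if (PySem.List.slice (d.getD p.1 []) (some 3) (some 5)).length = 2 ∧
            (PySem.List.slice p.2 (some 3) (some 5)).length = 2 then
          if (PySem.List.slice (d.getD p.1 []) (some 3) (some 5)).getD 0 "" =
                (PySem.List.slice p.2 (some 3) (some 5)).getD 0 "" ∧
              (PySem.List.slice (d.getD p.1 []) (some 3) (some 5)).getD 1 "" =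
                (PySem.List.slice p.2 (some 3) (some 5)).getD 1 "" then d.erase p.1
          else d
        else d
      else
        if (PySem.List.slice p.2 (some 3) (some 5)).length = 2 then
          d.insert p.1 ((p.2.set 3 ((PySem.List.slice p.2 (some 3) (some 5)).getD 1 "")).set 4
            ((PySem.List.slice p.2 (some 3) (some 5)).getD 0 ""))
        else d) d).items
    = d.items.filter (fun q => !pvDel pers q)
      ++ (pers.filter (fun p => !d.contains p.1)).map pvAddEntry := by
  induction pers generalizing d with
  | nil => simp [pvDel_nil]
  | cons p pers ih =>
    have hq1 : p.1 ∉ pers.map Prod.fst := (List.nodup_cons.mp (by simpa using hpn)).1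
    have hlp : 5 ≤ p.2.length := hlen p List.mem_cons_self
    obtain ⟨pr, pa, hpa⟩ := pvSl_pair hlp
    have hpa' : PySem.List.slice p.2 (some 3) (some 5) = [pr, pa] := hpa
    have hKnd : d.keys.Nodup := hnd
    rw [List.foldl_cons]
    by_cases hc : d.contains p.1 = true
    · obtain ⟨v, hv⟩ : ∃ v, d.get? p.1 = some v := by
        rw [PySem.Dict.contains_eq_isSome_get?] at hc
        exact Option.isSome_iff_exists.mp hc
      have hgetD : d.getD p.1 [] = v := PySem.Dict.getD_of_get?_eq_some _ _ hv
      have hstep :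
          (if d.contains p.1 then
        if (PySem.List.slice (d.getD p.1 []) (some 3) (some 5)).length = 2 ∧
            (PySem.List.slice p.2 (some 3) (some 5)).length = 2 then
          if (PySem.List.slice (d.getD p.1 []) (some 3) (some 5)).getD 0 "" =
                (PySem.List.slice p.2 (some 3) (some 5)).getD 0 "" ∧
              (PySem.List.slice (d.getD p.1 []) (some 3) (some 5)).getD 1 "" =
                (PySem.List.slice p.2 (some 3) (some 5)).getD 1 "" then d.erase p.1
          else d
        else d
      else
        if (PySem.List.slice p.2 (some 3) (some 5)).length = 2 then
          d.insert p.1 ((p.2.set 3 ((PySem.List.slice p.2 (some 3) (some 5)).getD 1 "")).set 4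
            ((PySem.List.slice p.2 (some 3) (some 5)).getD 0 ""))
        else d)
          = (if pvSl v = pvSl p.2 then d.erase p.1 else d) := by
        simp only [if_pos hc, hgetD]
        rcases hsv : PySem.List.slice v (some 3) (some 5) with _ | ⟨a, _ | ⟨b, _ | ⟨c, t⟩⟩⟩
        · simp [pvSl, hsv, hpa']
        · simp [pvSl, hsv, hpa']
        · by_cases hab : a = pr ∧ b = pa
          · simp [pvSl, hsv, hpa', hab.1, hab.2]
          · have hne : ¬([a, b] = [pr, pa]) := by
              intro h
              exact hab ⟨by injection h, by injection h with _ h2; injection h2⟩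
            simp [pvSl, hsv, hpa', hab, hne]
        · simp [pvSl, hsv, hpa']
      rw [hstep]
      by_cases hdeq : pvSl v = pvSl p.2
      · rw [if_pos hdeq, ih (d.erase p.1) (nodup_erase_keys hnd) (List.Nodup.of_cons hpn)
          (fun r hr => hlen r (List.mem_cons_of_mem _ hr))]
        have he : (d.erase p.1).items = d.items.filter (fun q => !(q.1 == p.1)) := rfl
        rw [he, List.filter_filter]
        have hfl : d.items.filter (fun q => !pvDel pers q && !(q.1 == p.1))
            = d.items.filter (fun q => !pvDel (p :: pers) q) := by
          apply List.filter_congr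
          intro q hq
          obtain ⟨qk, qv⟩ := q
          rw [pvDel_cons]
          by_cases hqp : qk = p.1
          · have hqv : qv = v := by
              have hgq : d.get? qk = some qv := PySem.Dict.get?_of_mem_items d hq hKnd
              rw [hqp] at hgq
              exact Option.some.inj (hgq.symm.trans hv)
            simp [hqp, hqv, hdeq]
          · simp [hqp]
        have hct : pers.filter (fun r => !(d.erase p.1).contains r.1)
            = pers.filter (fun r => !d.contains r.1) := by
          apply List.filter_congr
          intro r hr
          have hne : r.1 ≠ p.1 := fun h => hq1 (h ▸ List.mem_map_of_mem hr)
          rw [contains_erase_of_ne hne]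
        rw [hfl, hct]
        have hhead : (p :: pers).filter (fun r => !d.contains r.1)
            = pers.filter (fun r => !d.contains r.1) := by
          simp [hc]
        rw [hhead]
      · rw [if_neg hdeq, ih d hnd (List.Nodup.of_cons hpn)
          (fun r hr => hlen r (List.mem_cons_of_mem _ hr))]
        have hfl : d.items.filter (fun q => !pvDel pers q)
            = d.items.filter (fun q => !pvDel (p :: pers) q) := by
          apply List.filter_congr
          intro q hq
          obtain ⟨qk, qv⟩ := q
          rw [pvDel_cons]
          by_cases hqp : qk = p.1
          · have hqv : qv = v := by
              have hgq : d.get? qk = some qv := PySem.Dict.get?_of_mem_items d hq hKnd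
              rw [hqp] at hgq
              exact Option.some.inj (hgq.symm.trans hv)
            rw [pvDel_of_not_mem (q := (qk, qv)) (by simpa [hqp] using hq1)]
            simp [hqp, hqv, hdeq]
          · simp [hqp]
        have hhead : (p :: pers).filter (fun r => !d.contains r.1)
            = pers.filter (fun r => !d.contains r.1) := by
          simp [hc]
        rw [hfl, hhead]
    · have hcf : d.contains p.1 = false := Bool.of_not_eq_true hc
      have hstep :
          (if d.contains p.1 then
        if (PySem.List.slice (d.getD p.1 []) (some 3) (some 5)).length = 2 ∧
            (PySem.List.slice p.2 (some 3) (some 5)).length = 2 then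
          if (PySem.List.slice (d.getD p.1 []) (some 3) (some 5)).getD 0 "" =
                (PySem.List.slice p.2 (some 3) (some 5)).getD 0 "" ∧
              (PySem.List.slice (d.getD p.1 []) (some 3) (some 5)).getD 1 "" =
                (PySem.List.slice p.2 (some 3) (some 5)).getD 1 "" then d.erase p.1
          else d
        else d
      else
        if (PySem.List.slice p.2 (some 3) (some 5)).length = 2 then
          d.insert p.1 ((p.2.set 3 ((PySem.List.slice p.2 (some 3) (some 5)).getD 1 "")).set 4
            ((PySem.List.slice p.2 (some 3) (some 5)).getD 0 ""))
        else d)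
          = d.insert p.1 ((p.2.set 3 pa).set 4 pr) := by
        simp [hcf, hpa']
      rw [hstep]
      have hnd' : (((d.insert p.1 ((p.2.set 3 pa).set 4 pr)).items).map Prod.fst).Nodup := by
        rw [PySem.Dict.items_insert_of_not_contains _ _ hcf, List.map_append]
        have hpm : p.1 ∉ d.items.map Prod.fst := by
          intro hm
          rw [(contains_iff_mem_map_fst d p.1).mpr hm] at hcf
          simp at hcf
        rw [List.map_cons, List.map_nil]
        simp [List.nodup_append, hnd]
        intro b x hb hba
        exact hpm (hba ▸ List.mem_map_of_mem (f := Prod.fst) hb)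
      rw [ih (d.insert p.1 ((p.2.set 3 pa).set 4 pr)) hnd' (List.Nodup.of_cons hpn)
        (fun r hr => hlen r (List.mem_cons_of_mem _ hr))]
      rw [PySem.Dict.items_insert_of_not_contains _ _ hcf]
      have hflap : (d.items ++ [(p.1, (p.2.set 3 pa).set 4 pr)]).filter (fun q => !pvDel pers q)
          = d.items.filter (fun q => !pvDel (p :: pers) q) ++ [(p.1, (p.2.set 3 pa).set 4 pr)] := by
        rw [List.filter_append]
        have h2 : pvDel pers (p.1, (p.2.set 3 pa).set 4 pr) = false := pvDel_of_not_mem hq1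
        have hfl : d.items.filter (fun q => !pvDel pers q)
            = d.items.filter (fun q => !pvDel (p :: pers) q) := by
          apply List.filter_congr
          intro q hq
          rw [pvDel_cons]
          have hqp : q.1 ≠ p.1 := by
            intro h
            rw [(contains_iff_mem_map_fst d p.1).mpr (h ▸ List.mem_map_of_mem hq)] at hcf
            simp at hcf
          simp [hqp]
        simp [h2, hfl]
      have hct : pers.filter (fun r => !(d.insert p.1 ((p.2.set 3 pa).set 4 pr)).contains r.1)
          = pers.filter (fun r => !d.contains r.1) := by
        apply List.filter_congr
        intro r hr
        rw [PySem.Dict.contains_insert]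
        have hne : r.1 ≠ p.1 := fun h => hq1 (h ▸ List.mem_map_of_mem hr)
        have hb : (r.1 == p.1) = false := by simp [hne]
        rw [hb, Bool.false_or]
      have hhead : (p :: pers).filter (fun r => !d.contains r.1)
          = p :: pers.filter (fun r => !d.contains r.1) := by
        simp [hcf]
      have hadd : pvAddEntry p = (p.1, (p.2.set 3 pa).set 4 pr) := by
        simp [pvAddEntry, pvSl, hpa']
      rw [hflap, hct, hhead, List.map_cons, hadd, List.append_assoc]
      rfl

-- A's del_locs loop, characterised
lemma loopDel (pers : List (String × List String)) (L : List (String × List String))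
    (s : PySem.Set String)
    (hnd : (L.map Prod.fst).Nodup)
    (hdisj : ∀ q ∈ L, PySem.Set.contains s q.1 = false)
    (hlenP : ∀ p ∈ pers, 5 ≤ p.2.length) :
    L.foldl (fun s q =>
      if (PySem.Dict.mk pers).contains q.1 then
        match PySem.List.slice q.2 (some 3) (some 5),
              PySem.List.slice ((PySem.Dict.mk pers).getD q.1 []) (some 3) (some 5) with
        | [ref, alt], [pers_ref, pers_alt] =>
            if ref = pers_ref ∧ alt = pers_alt then PySem.Set.add s q.1 else s
        | _, _ => s
      else s) s
    = s ++ (L.filter (pvDel pers)).map Prod.fst := by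
  induction L generalizing s with
  | nil => simp
  | cons q L ih =>
    have hstep :
        (if (PySem.Dict.mk pers).contains q.1 then
          match PySem.List.slice q.2 (some 3) (some 5),
                PySem.List.slice ((PySem.Dict.mk pers).getD q.1 []) (some 3) (some 5) with
          | [ref, alt], [pers_ref, pers_alt] =>
              if ref = pers_ref ∧ alt = pers_alt then PySem.Set.add s q.1 else s
          | _, _ => s
        else s) = (if pvDel pers q then s ++ [q.1] else s) := by
      by_cases hc : (PySem.Dict.mk pers).contains q.1 = true
      · obtain ⟨line, hline⟩ : ∃ line, (PySem.Dict.mk pers).get? q.1 = some line := by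
          rw [PySem.Dict.contains_eq_isSome_get?] at hc
          exact Option.isSome_iff_exists.mp hc
        have hmem : ∃ p ∈ pers, p.2 = line := by
          have := PySem.Dict.mem_items_of_get?_eq_some _ hline
          exact ⟨(q.1, line), this, rfl⟩
        obtain ⟨p, hp, hpl⟩ := hmem
        have hll : 5 ≤ line.length := hpl ▸ hlenP p hp
        obtain ⟨x, y, hxy⟩ := pvSl_pair hll
        have hget : (PySem.Dict.mk pers).getD q.1 [] = line := by
          rw [PySem.Dict.getD_eq_get?_getD, hline]; rfl
        have e2 : PySem.List.slice ((PySem.Dict.mk pers).getD q.1 []) (some 3) (some 5) = [x, y] := by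
          rw [hget]; exact hxy
        have hdel : pvDel pers q = decide (pvSl q.2 = [x, y]) := by
          simp [pvDel, hline, hxy]
        have hadd : PySem.Set.add s q.1 = s ++ [q.1] := by
          have h0 := hdisj q List.mem_cons_self
          simp [PySem.Set.contains, List.contains_eq_mem] at h0
          simp [PySem.Set.add, PySem.Set.contains, List.contains_eq_mem, h0]
        rw [if_pos hc, e2]
        rcases hq2 : PySem.List.slice q.2 (some 3) (some 5) with _ | ⟨a, _ | ⟨b, _ | ⟨c, t⟩⟩⟩
        · simp [hdel, pvSl, hq2]
        · simp [hdel, pvSl, hq2]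
        · by_cases hab : a = x ∧ b = y
          · simp [hdel, pvSl, hq2, hab.1, hab.2, hadd]
          · have hne : ¬([a, b] = [x, y]) := by
              intro h
              exact hab ⟨by injection h, by injection h with _ h2; injection h2⟩
            simp [hdel, pvSl, hq2, hab, hne]
        · simp [hdel, pvSl, hq2]
      · have hdel : pvDel pers q = false := by
          rw [PySem.Dict.contains_eq_isSome_get?] at hc
          simp only [pvDel]
          rcases hg : (PySem.Dict.mk pers).get? q.1 with _ | line
          · rfl
          · rw [hg] at hc; simp at hc
        simp [hc, hdel]
    rw [List.foldl_cons, hstep]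
    by_cases hd : pvDel pers q = true
    · rw [if_pos hd, ih (s ++ [q.1]) (List.Nodup.of_cons hnd)
        (by
          intro r hr
          have hq1 : q.1 ∉ L.map Prod.fst := (List.nodup_cons.mp (by simpa using hnd)).1
          have hne : r.1 ≠ q.1 := by
            intro h
            exact hq1 (h ▸ List.mem_map_of_mem hr)
          have h1 := hdisj r (List.mem_cons_of_mem _ hr)
          simp [PySem.Set.contains, List.contains_eq_mem] at h1 ⊢
          exact ⟨h1, hne⟩)]
      simp [hd]
    · rw [if_neg hd, ih s (List.Nodup.of_cons hnd)
        (fun r hr => hdisj r (List.mem_cons_of_mem _ hr))]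
      simp [hd]

-- erasing a list of keys, characterised
lemma loopErase (K : List String) (d : PySem.Dict String (List String)) :
    (K.foldl (fun d loc => d.erase loc) d).items
      = d.items.filter (fun q => !K.contains q.1) := by
  induction K generalizing d with
  | nil => simp
  | cons k K ih =>
    rw [List.foldl_cons, ih]
    have he : (d.erase k).items = d.items.filter (fun q => !(q.1 == k)) := rfl
    rw [he, List.filter_filter]
    apply List.filter_congr
    intro q hq
    by_cases h : q.1 = k
    · simp [h]
    · simp [h]

-- A's insertion loop, characterised
lemma loopIns (pers : List (String × List String)) (d : PySem.Dict String (List String))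
    (S : PySem.Set String) (C : String → Bool)
    (hpn : (pers.map Prod.fst).Nodup)
    (hlen : ∀ p ∈ pers, 5 ≤ p.2.length)
    (hcond : ∀ p ∈ pers, (d.contains p.1 || PySem.Set.contains S p.1) = C p.1) :
    (pers.foldl (fun d p =>
      if d.contains p.1 || PySem.Set.contains S p.1 then d
      else
        match PySem.List.slice p.2 (some 3) (some 5) with
        | [pers_ref, pers_alt] => d.insert p.1 ((p.2.set 3 pers_alt).set 4 pers_ref)
        | _ => d) d).items
    = d.items ++ (pers.filter (fun p => !C p.1)).map pvAddEntry := by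
  induction pers generalizing d with
  | nil => simp
  | cons p pers ih =>
    have hcp := hcond p List.mem_cons_self
    have hq1 : p.1 ∉ pers.map Prod.fst := (List.nodup_cons.mp (by simpa using hpn)).1
    rw [List.foldl_cons]
    by_cases hC : C p.1 = true
    · rw [if_pos (hcp.trans hC), ih d (List.Nodup.of_cons hpn)
        (fun r hr => hlen r (List.mem_cons_of_mem _ hr))
        (fun r hr => hcond r (List.mem_cons_of_mem _ hr))]
      simp [hC]
    · have hor : (d.contains p.1 || PySem.Set.contains S p.1) = false := by
        rw [hcp]; exact Bool.of_not_eq_true hC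
      have hdc : d.contains p.1 = false := by
        cases h : d.contains p.1
        · rfl
        · rw [h] at hor; simp at hor
      obtain ⟨x, y, hxy⟩ := pvSl_pair (hlen p List.mem_cons_self)
      rw [if_neg (by rw [hor]; simp)]
      have hxy' : PySem.List.slice p.2 (some 3) (some 5) = [x, y] := hxy
      rw [hxy']
      rw [ih (d.insert p.1 ((p.2.set 3 y).set 4 x)) (List.Nodup.of_cons hpn)
        (fun r hr => hlen r (List.mem_cons_of_mem _ hr))
        (by
          intro r hr
          rw [PySem.Dict.contains_insert]
          have hne : r.1 ≠ p.1 := fun h => hq1 (h ▸ List.mem_map_of_mem hr)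
          have hb : (r.1 == p.1) = false := by simp [hne]
          rw [hb, Bool.false_or]
          exact hcond r (List.mem_cons_of_mem _ hr))]
      rw [PySem.Dict.items_insert_of_not_contains _ _ hdc]
      have hadd : pvAddEntry p = (p.1, (p.2.set 3 y).set 4 x) := by
        simp [pvAddEntry, pvSl, hxy']
      simp [hC, hadd]

lemma mem_DL_iff (pers vcf : List (String × List String)) (hvn : (vcf.map Prod.fst).Nodup)
    {q : String × List String} (hq : q ∈ vcf) :
    q.1 ∈ (vcf.filter (pvDel pers)).map Prod.fst ↔ pvDel pers q = true := by
  constructor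
  · intro hm
    obtain ⟨q', hq', hk⟩ := List.mem_map.mp hm
    obtain ⟨hq'v, hq'd⟩ := List.mem_filter.mp hq'
    have : q' = q := List.inj_on_of_nodup_map hvn hq'v hq hk
    exact this ▸ hq'd
  · intro hd
    exact List.mem_map_of_mem (List.mem_filter.mpr ⟨hq, hd⟩)

-- ===== VERDICT (by name: the statement is the Claim_ definition above) =====
theorem rebase_vcf_spec : Claim_equal_rebase_vcf := by
  intro pers vcf _hdom hpre
  obtain ⟨hpn, hvn, hlenP, _hlenV⟩ := hpre
  show rebase_vcf pers vcf = rebase_vcf_alt pers vcf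
  simp only [rebase_vcf, rebase_vcf_alt]
  have hiv : (PySem.Dict.mk vcf : PySem.Dict String (List String)).items = vcf := rfl
  have hip : (PySem.Dict.mk pers : PySem.Dict String (List String)).items = pers := rfl
  simp only [loopB pers (PySem.Dict.mk vcf) hvn hpn hlenP]
  simp only [loopDel pers vcf PySem.Set.empty hvn (fun q _ => rfl) hlenP]
  simp only [PySem.Set.empty, List.nil_append]
  set DL := (vcf.filter (pvDel pers)).map Prod.fst with hDL
  have hcond : ∀ p ∈ pers,
      (((DL.foldl (fun d loc => d.erase loc) (PySem.Dict.mk vcf)).contains p.1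
        || PySem.Set.contains DL p.1) = (PySem.Dict.mk vcf : PySem.Dict String (List String)).contains p.1) := by
    intro p _
    rw [Bool.eq_iff_iff, Bool.or_eq_true, contains_iff_mem_map_fst, contains_iff_mem_map_fst,
      loopErase]
    simp only [PySem.Set.contains, List.contains_eq_mem, decide_eq_true_eq]
    constructor
    · rintro (hm | hm)
      · obtain ⟨q, hq, hk⟩ := List.mem_map.mp hm
        exact hk ▸ List.mem_map_of_mem (List.mem_filter.mp hq).1
      · rw [hDL] at hm
        obtain ⟨q, hq, hk⟩ := List.mem_map.mp hm
        exact hk ▸ List.mem_map_of_mem (List.mem_filter.mp hq).1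
    · intro hm
      by_cases hd : p.1 ∈ DL
      · exact Or.inr hd
      · left
        obtain ⟨q, hq, hk⟩ := List.mem_map.mp hm
        have hpred : (!decide (q.1 ∈ DL)) = true := by
          rw [hk]
          simp [hd]
        exact hk ▸ List.mem_map_of_mem (List.mem_filter.mpr ⟨hq, hpred⟩)
  refine (loopIns pers _ DL
    (fun k => (PySem.Dict.mk vcf : PySem.Dict String (List String)).contains k) hpn hlenP hcond).trans ?_
  rw [loopErase]
  congr 1
  apply List.filter_congr
  intro q hq
  have hq' : q ∈ vcf := hq
  have : DL.contains q.1 = pvDel pers q := by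
    rw [List.contains_eq_mem]
    by_cases hd : pvDel pers q = true
    · rw [decide_eq_true ((mem_DL_iff pers vcf hvn hq').mpr hd)]
      exact hd.symm
    · have hnm : q.1 ∉ DL := fun hm => hd ((mem_DL_iff pers vcf hvn hq').mp hm)
      rw [decide_eq_false hnm]
      exact (Bool.eq_false_iff.mpr hd).symm
  rw [this]
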